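-- pv_equiv track=rewrite | github.com/mrjabka/-9- | Графы/Ещё задачи на виды представления графов/B. Полустепени вершин.py | calculate_degrees
-- ===== SOURCE A (Python) =====
-- def calculate_degrees(n, adjacency_matrix):
--
--     in_degrees = [0] * n
--     out_degrees = [0] * n
--
--     for i in range(n):
--         for j in range(n):
--             if adjacency_matrix[i][j] == 1:
--                 out_degrees[i] += 1
--                 in_degrees[j] += 1
--
--     return in_degrees, out_degrees
-- ===== SOURCE B (Python) =====
-- def calculate_degrees(n, adjacency_matrix):
--     out_degrees = [sum(1 for j in range(n) if adjacency_matrix[i][j] == 1)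
--                    for i in range(n)]
--     in_degrees = [sum(1 for i in range(n) if adjacency_matrix[i][j] == 1)
--                   for j in range(n)]
--     return in_degrees, out_degrees
-- ===== Notes on version B (the rewrite author's own statement) =====
-- stated objective: simpler
-- what changed: Replaces the fused mutating double loop (one pass updating both degree arrays in place) by two independent counting comprehensions: out-degree of i counts the 1-entries of row i, in-degree of j counts the 1-entries of column j; no mutable state.
import Mathlib
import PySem

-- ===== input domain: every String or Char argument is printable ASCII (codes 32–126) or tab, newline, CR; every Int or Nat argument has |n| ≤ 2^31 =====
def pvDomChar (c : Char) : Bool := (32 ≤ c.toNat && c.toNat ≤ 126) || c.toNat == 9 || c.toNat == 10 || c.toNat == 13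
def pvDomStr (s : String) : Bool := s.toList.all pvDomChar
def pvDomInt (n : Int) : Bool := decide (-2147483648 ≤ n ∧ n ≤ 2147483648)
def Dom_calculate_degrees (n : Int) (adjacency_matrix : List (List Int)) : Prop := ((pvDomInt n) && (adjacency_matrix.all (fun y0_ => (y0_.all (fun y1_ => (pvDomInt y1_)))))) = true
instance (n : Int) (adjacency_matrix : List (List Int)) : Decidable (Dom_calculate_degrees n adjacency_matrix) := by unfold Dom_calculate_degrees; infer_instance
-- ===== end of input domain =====

-- B replaces A's fused in-place double loop by two independent counting passes (rows for
-- out-degrees, columns for in-degrees); objective: simpler (no mutable state), same O(n^2) cost.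


-- ===== PORT A =====
-- adjacency_matrix[i][j] : out-of-range access is a Python IndexError, excluded by Pre_;
-- the total form below defaults to 0 there (never reached inside Pre_).
def pvCellA (adjacency_matrix : List (List Int)) (i j : Int) : Int :=
  (PySem.List.pyGet? ((PySem.List.pyGet? adjacency_matrix i).getD []) j).getD 0

-- l[k] += 1 (k is a valid non-negative index under Pre_)
def pvIncAt (l : List Int) (k : Nat) : List Int := l.set k (l.getD k 0 + 1)

def calculate_degrees (n : Int) (adjacency_matrix : List (List Int)) : List Int × List Int :=
  let in0 : List Int := List.replicate n.toNat 0      -- [0] * n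
  let out0 : List Int := List.replicate n.toNat 0     -- [0] * n
  (PySem.List.pyRange 0 n 1).foldl (fun st i =>
    (PySem.List.pyRange 0 n 1).foldl (fun st j =>
      if pvCellA adjacency_matrix i j == 1 then
        (pvIncAt st.1 j.toNat, pvIncAt st.2 i.toNat)
      else st) st) (in0, out0)

-- ===== PORT B =====
def calculate_degrees_alt (n : Int) (adjacency_matrix : List (List Int)) : List Int × List Int :=
  let rng := PySem.List.pyRange 0 n 1
  let out_degrees : List Int :=
    rng.map (fun i => ((rng.countP (fun j => (PySem.List.pyGet? ((PySem.List.pyGet? adjacency_matrix i).getD []) j).getD 0 == 1) : Nat) : Int))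
  let in_degrees : List Int :=
    rng.map (fun j => ((rng.countP (fun i => (PySem.List.pyGet? ((PySem.List.pyGet? adjacency_matrix i).getD []) j).getD 0 == 1) : Nat) : Int))
  (in_degrees, out_degrees)

-- ===== PRECONDITION & SPEC =====
-- Pre_ excludes exactly the IndexError inputs of A: 0 < n with fewer than n rows, or one of
-- the first n rows shorter than n.
def Pre_calculate_degrees (n : Int) (adjacency_matrix : List (List Int)) : Prop :=
  n ≤ 0 ∨ (n.toNat ≤ adjacency_matrix.length ∧
    ∀ row ∈ adjacency_matrix.take n.toNat, n.toNat ≤ row.length)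
instance (n : Int) (adjacency_matrix : List (List Int)) : Decidable (Pre_calculate_degrees n adjacency_matrix) := by unfold Pre_calculate_degrees; infer_instance

def pvWitness_calculate_degrees : Int × List (List Int) := (2, [[0, 1], [1, 0]])

def Spec_calculate_degrees (n : Int) (adjacency_matrix : List (List Int)) (out : List Int × List Int) : Prop := out = calculate_degrees_alt n adjacency_matrix
instance (n : Int) (adjacency_matrix : List (List Int)) (out : List Int × List Int) : Decidable (Spec_calculate_degrees n adjacency_matrix out) := by unfold Spec_calculate_degrees; infer_instance

-- ===== CLAIM (what is proved, stated in full; the proofs are below) =====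
def Claim_equal_calculate_degrees : Prop := ∀ (n : Int) (adjacency_matrix : List (List Int)), Dom_calculate_degrees n adjacency_matrix → Pre_calculate_degrees n adjacency_matrix → Spec_calculate_degrees n adjacency_matrix (calculate_degrees n adjacency_matrix)

-- ===== LEMMAS AND PROOFS =====

-- Nat-indexed cell predicate (shared reading of both ports' cell test)
def pvP (A : List (List Int)) (i j : Nat) : Bool := pvCellA A (i : Int) (j : Int) == 1

-- the inner loop's per-j update on the in-degree list
def pvFoldIn (A : List (List Int)) (i : Nat) (r : Nat) (l : List Int) : List Int :=
  (List.range r).foldl (fun l j => if pvP A i j then pvIncAt l j else l) l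

-- the inner loop's per-j update on the out-degree list (all increments at fixed i)
def pvFoldOut (A : List (List Int)) (i : Nat) (r : Nat) (l : List Int) : List Int :=
  (List.range r).foldl (fun l j => if pvP A i j then pvIncAt l i else l) l

lemma pvIncAt_length (l : List Int) (k : Nat) : (pvIncAt l k).length = l.length := by
  simp [pvIncAt]

lemma pvFoldIn_length (A : List (List Int)) (i r : Nat) (l : List Int) :
    (pvFoldIn A i r l).length = l.length := by
  induction r generalizing l with
  | zero => simp [pvFoldIn]
  | succ r ih =>
      simp only [pvFoldIn, List.range_succ, List.foldl_append, List.foldl_cons, List.foldl_nil]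
      rw [show (List.range r).foldl (fun l j => if pvP A i j then pvIncAt l j else l) l
            = pvFoldIn A i r l from rfl]
      split <;> simp [pvIncAt_length, ih]

lemma pvFoldOut_length (A : List (List Int)) (i r : Nat) (l : List Int) :
    (pvFoldOut A i r l).length = l.length := by
  induction r generalizing l with
  | zero => simp [pvFoldOut]
  | succ r ih =>
      simp only [pvFoldOut, List.range_succ, List.foldl_append, List.foldl_cons, List.foldl_nil]
      rw [show (List.range r).foldl (fun l j => if pvP A i j then pvIncAt l i else l) l
            = pvFoldOut A i r l from rfl]
      split <;> simp [pvIncAt_length, ih]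

lemma pvIncAt_getD (l : List Int) (j k : Nat) (hj : j < l.length) :
    (pvIncAt l j).getD k 0 = if k = j then l.getD k 0 + 1 else l.getD k 0 := by
  by_cases h : k = j
  · subst h; simp [pvIncAt, hj]
  · simp [pvIncAt, List.getElem?_set_ne (Ne.symm h), h]

lemma pvFoldIn_getD (A : List (List Int)) (i r : Nat) (l : List Int) (k : Nat)
    (hk : k < l.length) (hr : r ≤ l.length) :
    (pvFoldIn A i r l).getD k 0
      = l.getD k 0 + (if k < r ∧ pvP A i k then 1 else 0) := by
  induction r generalizing l with
  | zero => simp [pvFoldIn]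
  | succ r ih =>
      simp only [pvFoldIn, List.range_succ, List.foldl_append, List.foldl_cons, List.foldl_nil]
      rw [show (List.range r).foldl (fun l j => if pvP A i j then pvIncAt l j else l) l
            = pvFoldIn A i r l from rfl]
      have hlen := pvFoldIn_length A i r l
      have hrk : r < l.length := by omega
      have hstep : ∀ (m : List Int), m.length = l.length →
          (if pvP A i r then pvIncAt m r else m).getD k 0
            = m.getD k 0 + (if k = r ∧ pvP A i r then 1 else 0) := by
        intro m hm
        by_cases hp : pvP A i r
        · rw [if_pos hp, pvIncAt_getD m r k (by omega)]
          by_cases hkr : k = r <;> simp [hkr, hp]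
        · simp [hp]
      rw [hstep _ hlen, ih l hk (by omega)]
      by_cases hkr : k = r
      · subst hkr
        by_cases hp : pvP A i k <;> simp [hp]
      · have : (k < r + 1) ↔ (k < r) := by omega
        simp [hkr, this]

lemma pvFoldOut_getD (A : List (List Int)) (i r : Nat) (l : List Int) (k : Nat)
    (hk : k < l.length) (hi : i < l.length) :
    (pvFoldOut A i r l).getD k 0
      = l.getD k 0 + (if k = i then ((List.range r).countP (pvP A i) : Int) else 0) := by
  induction r generalizing l with
  | zero => simp [pvFoldOut]
  | succ r ih =>
      simp only [pvFoldOut, List.range_succ, List.foldl_append, List.foldl_cons, List.foldl_nil]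
      rw [show (List.range r).foldl (fun l j => if pvP A i j then pvIncAt l i else l) l
            = pvFoldOut A i r l from rfl]
      have hlen := pvFoldOut_length A i r l
      have hstep : ∀ (m : List Int), m.length = l.length →
          (if pvP A i r then pvIncAt m i else m).getD k 0
            = m.getD k 0 + (if k = i ∧ pvP A i r then 1 else 0) := by
        intro m hm
        by_cases hp : pvP A i r
        · rw [if_pos hp, pvIncAt_getD m i k (by omega)]
          by_cases hki : k = i <;> simp [hki, hp]
        · simp [hp]
      rw [hstep _ hlen, ih l hk hi]
      rw [List.countP_append]
      by_cases hki : k = i <;> simp [hki, List.countP_cons]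
      by_cases hp : pvP A i r
      · simp [hp]; ring
      · simp [hp]

-- the outer loop on the in-degree list
def pvOuterIn (A : List (List Int)) (m r : Nat) (l : List Int) : List Int :=
  (List.range r).foldl (fun l i => pvFoldIn A i m l) l

-- the outer loop on the out-degree list
def pvOuterOut (A : List (List Int)) (m r : Nat) (l : List Int) : List Int :=
  (List.range r).foldl (fun l i => pvFoldOut A i m l) l

lemma pvOuterIn_length (A : List (List Int)) (m r : Nat) (l : List Int) :
    (pvOuterIn A m r l).length = l.length := by
  induction r generalizing l with
  | zero => simp [pvOuterIn]
  | succ r ih =>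
      simp only [pvOuterIn, List.range_succ, List.foldl_append, List.foldl_cons, List.foldl_nil]
      rw [show (List.range r).foldl (fun l i => pvFoldIn A i m l) l = pvOuterIn A m r l from rfl]
      rw [pvFoldIn_length, ih]

lemma pvOuterOut_length (A : List (List Int)) (m r : Nat) (l : List Int) :
    (pvOuterOut A m r l).length = l.length := by
  induction r generalizing l with
  | zero => simp [pvOuterOut]
  | succ r ih =>
      simp only [pvOuterOut, List.range_succ, List.foldl_append, List.foldl_cons, List.foldl_nil]
      rw [show (List.range r).foldl (fun l i => pvFoldOut A i m l) l = pvOuterOut A m r l from rfl]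
      rw [pvFoldOut_length, ih]

lemma pvOuterIn_getD (A : List (List Int)) (m r : Nat) (k : Nat) (hk : k < m) (hr : r ≤ m) :
    (pvOuterIn A m r (List.replicate m 0)).getD k 0
      = ((List.range r).countP (fun i => pvP A i k) : Int) := by
  induction r with
  | zero => simp [pvOuterIn, List.getD, hk]
  | succ r ih =>
      simp only [pvOuterIn, List.range_succ, List.foldl_append, List.foldl_cons, List.foldl_nil]
      rw [show (List.range r).foldl (fun l i => pvFoldIn A i m l) (List.replicate m 0)
            = pvOuterIn A m r (List.replicate m 0) from rfl]
      have hlen : (pvOuterIn A m r (List.replicate m 0)).length = m := by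
        rw [pvOuterIn_length]; simp
      rw [pvFoldIn_getD A r m _ k (by omega) (by omega), ih (by omega)]
      rw [List.countP_append, List.countP_cons]
      by_cases hp : pvP A r k <;> simp [hp, hk]

lemma pvOuterOut_getD (A : List (List Int)) (m r : Nat) (k : Nat) (hk : k < m) (hr : r ≤ m) :
    (pvOuterOut A m r (List.replicate m 0)).getD k 0
      = if k < r then ((List.range m).countP (pvP A k) : Int) else 0 := by
  induction r with
  | zero => simp [pvOuterOut, List.getD, hk]
  | succ r ih =>
      simp only [pvOuterOut, List.range_succ, List.foldl_append, List.foldl_cons, List.foldl_nil]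
      rw [show (List.range r).foldl (fun l i => pvFoldOut A i m l) (List.replicate m 0)
            = pvOuterOut A m r (List.replicate m 0) from rfl]
      have hlen : (pvOuterOut A m r (List.replicate m 0)).length = m := by
        rw [pvOuterOut_length]; simp
      rw [pvFoldOut_getD A r m _ k (by omega) (by omega), ih (by omega)]
      by_cases hkr : k = r
      · subst hkr; simp
      · have : (k < r + 1) ↔ (k < r) := by omega
        simp [hkr, this]

-- A's fold, rewritten as the decoupled Nat-indexed pair of folds
lemma calculate_degrees_decoupled (n : Int) (A : List (List Int)) :
    calculate_degrees n A
      = (pvOuterIn A n.toNat n.toNat (List.replicate n.toNat 0),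
         pvOuterOut A n.toNat n.toNat (List.replicate n.toNat 0)) := by
  unfold calculate_degrees
  rw [PySem.List.pyRange_zero]
  rw [List.foldl_map]
  have hinner : ∀ (i : Nat) (a b : List Int),
      (List.map (fun (k : Nat) => (k : Int)) (List.range n.toNat)).foldl
        (fun st j => if pvCellA A (i : Int) j == 1 then
            (pvIncAt st.1 j.toNat, pvIncAt st.2 (i : Int).toNat) else st) (a, b)
        = (pvFoldIn A i n.toNat a, pvFoldOut A i n.toNat b) := by
    intro i a b
    rw [List.foldl_map]
    have hfun : (fun (st : List Int × List Int) (j : Nat) =>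
        if pvCellA A (i : Int) (j : Int) == 1 then
          (pvIncAt st.1 (j : Int).toNat, pvIncAt st.2 (i : Int).toNat) else st)
        = fun st j => ((fun (l : List Int) (j : Nat) => if pvP A i j then pvIncAt l j else l) st.1 j,
                       (fun (l : List Int) (j : Nat) => if pvP A i j then pvIncAt l i else l) st.2 j) := by
      funext st j
      simp only [pvP, Int.toNat_natCast]
      split <;> rfl
    rw [hfun]
    exact PySem.List.foldl_prod_mk
      (fun (l : List Int) (j : Nat) => if pvP A i j then pvIncAt l j else l)
      (fun (l : List Int) (j : Nat) => if pvP A i j then pvIncAt l i else l) _ a b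
  have hsteps : (fun (st : List Int × List Int) (i : Nat) =>
      (List.map (fun (k : Nat) => (k : Int)) (List.range n.toNat)).foldl
        (fun st j => if pvCellA A (i : Int) j == 1 then
            (pvIncAt st.1 j.toNat, pvIncAt st.2 (i : Int).toNat) else st) st)
      = fun st i => ((fun (l : List Int) (i : Nat) => pvFoldIn A i n.toNat l) st.1 i,
                     (fun (l : List Int) (i : Nat) => pvFoldOut A i n.toNat l) st.2 i) := by
    funext st i
    simpa using hinner i st.1 st.2
  rw [hsteps]
  exact PySem.List.foldl_prod_mk
    (fun (l : List Int) (i : Nat) => pvFoldIn A i n.toNat l)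
    (fun (l : List Int) (i : Nat) => pvFoldOut A i n.toNat l) _ _ _

-- B's two column/row counts, Nat-indexed
lemma calculate_degrees_alt_counts (n : Int) (A : List (List Int)) :
    calculate_degrees_alt n A
      = ((List.range n.toNat).map
            (fun k => (((List.range n.toNat).countP (fun i => pvP A i k) : Nat) : Int)),
         (List.range n.toNat).map
            (fun k => (((List.range n.toNat).countP (pvP A k) : Nat) : Int))) := by
  unfold calculate_degrees_alt
  rw [PySem.List.pyRange_zero]
  simp only [List.map_map, List.countP_map]
  rfl

theorem pv_main (n : Int) (A : List (List Int)) :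
    calculate_degrees n A = calculate_degrees_alt n A := by
  rw [calculate_degrees_decoupled, calculate_degrees_alt_counts]
  refine Prod.ext ?_ ?_
  · apply List.ext_getElem
    · rw [pvOuterIn_length]; simp
    · intro k hk1 hk2
      have hkm : k < n.toNat := by simpa [pvOuterIn_length] using hk1
      have h1 : (pvOuterIn A n.toNat n.toNat (List.replicate n.toNat 0))[k] =
          (pvOuterIn A n.toNat n.toNat (List.replicate n.toNat 0)).getD k 0 := by
        rw [List.getD_eq_getElem _ _ hk1]
      rw [h1, pvOuterIn_getD A n.toNat n.toNat k hkm (le_refl _)]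
      simp
  · apply List.ext_getElem
    · rw [pvOuterOut_length]; simp
    · intro k hk1 hk2
      have hkm : k < n.toNat := by simpa [pvOuterOut_length] using hk1
      have h1 : (pvOuterOut A n.toNat n.toNat (List.replicate n.toNat 0))[k] =
          (pvOuterOut A n.toNat n.toNat (List.replicate n.toNat 0)).getD k 0 := by
        rw [List.getD_eq_getElem _ _ hk1]
      rw [h1, pvOuterOut_getD A n.toNat n.toNat k hkm (le_refl _)]
      simp [hkm]

-- ===== VERDICT (by name: the statement is the Claim_ definition above) =====
theorem calculate_degrees_spec : Claim_equal_calculate_degrees := by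
  intro n A _ _
  unfold Spec_calculate_degrees
  exact pv_main n A
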